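-- pv_equiv track=rewrite | github.com/RomanKapuscik/pythonFunnyProjects | Palindromes/multi_word_palindrome_optimalized.py | find_multi_word_palindromes
-- ===== SOURCE A (Python) =====
-- def find_multi_word_palindromes(words: set):
--     """Finds all multi-word palindromes possible to create using words from given dictionary.
--
--     :param words: set (set of words from dictionary)
--     :return: list (list of multi-word palindromes)
--     """
--     pali_list = []
--     for word in words:
--         end = len(word)
--         rev_word = word[::-1]
--         if end > 1:
--             for i in range(end):
--                 if word[i:] == rev_word[:end - i] and rev_word[end - i:] in words:
--                     pali_list.append((word, rev_word[end - i:]))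
--                 if word[:i] == rev_word[end - i:] and rev_word[:end - i] in words:
--                     pali_list.append((rev_word[:end - i], word))
--     return pali_list
-- ===== SOURCE B (Python) =====
-- def find_multi_word_palindromes(words):
--     """Finds all multi-word palindromes possible to create using words from given dictionary.
--
--     :param words: set (set of words from dictionary)
--     :return: list (list of multi-word palindromes)
--     """
--     out = []
--     for w in words:
--         n = len(w)
--         if n > 1:
--             # exact base-128 polynomial hashes (big ints, no modulus: injective on ASCII)
--             hsuf = 0                      # will hold hash of w[i:], starts at hash(w)
--             for ch in w:
--                 hsuf = hsuf * 128 + ord(ch)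
--             fullr = 0                     # hash of w reversed
--             for ch in reversed(w):
--                 fullr = fullr * 128 + ord(ch)
--             hp = 0                        # hash of w[:i]
--             hrk = fullr                   # hash of reversed(w[i:])
--             pd = 128 ** (n - 1)           # 128**(n-1-i)
--             q = 1                         # 128**i
--             for i in range(n):
--                 if hsuf == hrk:           # w[i:] is a palindrome
--                     cand = w[:i][::-1]
--                     if cand in words:
--                         out.append((w, cand))
--                 if hp == fullr - hrk * q: # w[:i] is a palindrome
--                     cand = w[i:][::-1]
--                     if cand in words:
--                         out.append((cand, w))
--                 c = ord(w[i])
--                 hp = hp * 128 + c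
--                 hsuf = hsuf - c * pd
--                 hrk = (hrk - c) // 128
--                 pd = pd // 128
--                 q = q * 128
--     return out
-- ===== Notes on version B (the rewrite author's own statement) =====
-- stated objective: alternative
-- what changed: B replaces A's per-split slice comparisons against the reversed word by exact base-128 big-int rolling hashes (injective on the ASCII domain): per word it precomputes the hash of w and of reversed w, then advances four rolling values (prefix hash, suffix hash, reversed-suffix hash, powers) with a few arithmetic updates per split and tests palindromicity by hash equality, building candidate strings only when a test fires.
import Mathlib
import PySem

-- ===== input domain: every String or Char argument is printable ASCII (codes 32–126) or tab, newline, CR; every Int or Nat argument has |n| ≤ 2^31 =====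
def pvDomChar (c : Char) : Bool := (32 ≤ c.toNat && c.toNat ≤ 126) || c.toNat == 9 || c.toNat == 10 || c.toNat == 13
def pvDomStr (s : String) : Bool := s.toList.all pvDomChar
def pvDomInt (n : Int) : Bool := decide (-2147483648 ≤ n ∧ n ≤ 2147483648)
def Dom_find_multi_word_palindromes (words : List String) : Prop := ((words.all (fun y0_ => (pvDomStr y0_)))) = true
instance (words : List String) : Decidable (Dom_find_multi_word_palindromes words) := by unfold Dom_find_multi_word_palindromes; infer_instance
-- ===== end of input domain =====

-- B replaces A's per-split slice comparisons and reversed-slice lookups by exact base-128 big-int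
-- rolling hashes (injective on the ASCII domain), advanced by a few arithmetic updates per split;
-- objective: alternative. Return value only; neither side mutates its argument.

-- ===== PORT A =====
-- word[::-1] is String.ofList word.toList.reverse, exact by PySem.Str.slice?_none_none_neg_one
def find_multi_word_palindromes (words : List String) : List (String × String) :=
  words.foldl (fun pali_list word =>
    let end_ : Int := PySem.Str.len word
    let rev_word : String := String.ofList word.toList.reverse
    if 1 < end_ then
      (PySem.List.pyRange 0 end_ 1).foldl (fun acc i =>
        let acc :=
          if (PySem.Str.slice word (some i) none == PySem.Str.slice rev_word none (some (end_ - i)))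
              && words.contains (PySem.Str.slice rev_word (some (end_ - i)) none) then
            acc ++ [(word, PySem.Str.slice rev_word (some (end_ - i)) none)]
          else acc
        if (PySem.Str.slice word none (some i) == PySem.Str.slice rev_word (some (end_ - i)) none)
            && words.contains (PySem.Str.slice rev_word none (some (end_ - i))) then
          acc ++ [(PySem.Str.slice rev_word none (some (end_ - i)), word)]
        else acc) pali_list
    else pali_list) []

-- ===== PORT B =====
-- loop body of Source B's split loop; state = (out, hp, hsuf, hrk, pd, q)
-- w[:i][::-1] / w[i:][::-1] are String.ofList (…).toList.reverse, exact by PySem.Str.slice?_none_none_neg_one;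
-- c = ord(w[i]) via PySem.Str.pyGet?, exact since 0 ≤ i < len(w) in the loop
def stepB (words : List String) (w : String) (fullr : Int)
    (st : List (String × String) × Int × Int × Int × Int × Int) (i : Int) :
    List (String × String) × Int × Int × Int × Int × Int :=
  match st with
  | (out, hp, hsuf, hrk, pd, q) =>
    let out :=
      if hsuf == hrk then
        let cand := String.ofList (PySem.Str.slice w none (some i)).toList.reverse
        if words.contains cand then out ++ [(w, cand)] else out
      else out
    let out :=
      if hp == fullr - hrk * q then
        let cand := String.ofList (PySem.Str.slice w (some i) none).toList.reverse
        if words.contains cand then out ++ [(cand, w)] else out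
      else out
    let c : Int := (((PySem.Str.pyGet? w i).getD ' ').toNat : Int)
    (out, hp * 128 + c, hsuf - c * pd, PySem.Int.floordiv (hrk - c) 128,
      PySem.Int.floordiv pd 128, q * 128)

-- 128 ** (n-1) is 128 ^ (n-1).toNat, exact since n ≥ 2 in the branch
def find_multi_word_palindromes_alt (words : List String) : List (String × String) :=
  words.foldl (fun out w =>
    let n : Int := PySem.Str.len w
    if 1 < n then
      let hsuf0 : Int := w.toList.foldl (fun a c => a * 128 + (c.toNat : Int)) 0
      let fullr : Int := w.toList.reverse.foldl (fun a c => a * 128 + (c.toNat : Int)) 0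
      ((PySem.List.pyRange 0 n 1).foldl (stepB words w fullr)
        (out, 0, hsuf0, fullr, 128 ^ (n - 1).toNat, 1)).1
    else out) []

-- ===== PRECONDITION & SPEC =====
def Spec_find_multi_word_palindromes (words : List String) (out : List (String × String)) : Prop := out = find_multi_word_palindromes_alt words
instance (words : List String) (out : List (String × String)) : Decidable (Spec_find_multi_word_palindromes words out) := by unfold Spec_find_multi_word_palindromes; infer_instance

-- ===== CLAIM (what is proved, stated in full; the proofs are below) =====
def Claim_equal_find_multi_word_palindromes : Prop := ∀ (words : List String), Dom_find_multi_word_palindromes words → Spec_find_multi_word_palindromes words (find_multi_word_palindromes words)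

-- ===== LEMMAS AND PROOFS =====

-- the exact base-128 hash both rolling computations of Source B maintain
def Hc (l : List Char) : Int := l.foldl (fun a c => a * 128 + (c.toNat : Int)) 0

lemma if_and_append {A : Type} (p m : Bool) (acc : List A) (x : A) :
    (if p then (if m then acc ++ [x] else acc) else acc) = (if p && m then acc ++ [x] else acc) := by
  cases p <;> simp

lemma Hc_from (l : List Char) (a : Int) :
    l.foldl (fun a c => a * 128 + (c.toNat : Int)) a = a * 128 ^ l.length + Hc l := by
  induction l generalizing a with
  | nil => simp [Hc]
  | cons c t ih =>
    simp only [List.foldl_cons, List.length_cons, Hc]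
    rw [ih, ih (0 * 128 + (c.toNat : Int))]
    ring

lemma Hc_cons (c : Char) (t : List Char) :
    Hc (c :: t) = (c.toNat : Int) * 128 ^ t.length + Hc t := by
  simp only [Hc, List.foldl_cons]
  simpa using Hc_from t (c.toNat : Int)

lemma Hc_append (l₁ l₂ : List Char) :
    Hc (l₁ ++ l₂) = Hc l₁ * 128 ^ l₂.length + Hc l₂ := by
  simp only [Hc, List.foldl_append]
  exact Hc_from l₂ _

lemma Hc_nonneg (l : List Char) : 0 ≤ Hc l := by
  induction l with
  | nil => simp [Hc]
  | cons c t ih => rw [Hc_cons]; positivity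

lemma Hc_lt (l : List Char) (h : ∀ c ∈ l, c.toNat < 128) : Hc l < 128 ^ l.length := by
  induction l with
  | nil => simp [Hc]
  | cons c t ih =>
    rw [Hc_cons]
    have hc : (c.toNat : Int) ≤ 127 := by
      have := h c (List.mem_cons_self)
      omega
    have ht : Hc t < 128 ^ t.length := ih (fun x hx => h x (List.mem_cons_of_mem _ hx))
    have hp : (0:Int) < 128 ^ t.length := by positivity
    calc (c.toNat : Int) * 128 ^ t.length + Hc t
        < (c.toNat : Int) * 128 ^ t.length + 128 ^ t.length := by omega
      _ = ((c.toNat : Int) + 1) * 128 ^ t.length := by ring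
      _ ≤ 128 * 128 ^ t.length := by nlinarith
      _ = 128 ^ (c :: t).length := by rw [List.length_cons]; ring

lemma Hc_inj (l₁ l₂ : List Char) (h₁ : ∀ c ∈ l₁, c.toNat < 128) (h₂ : ∀ c ∈ l₂, c.toNat < 128)
    (hlen : l₁.length = l₂.length) (h : Hc l₁ = Hc l₂) : l₁ = l₂ := by
  induction l₁ generalizing l₂ with
  | nil => cases l₂ <;> simp_all
  | cons c t ih =>
    cases l₂ with
    | nil => simp at hlen
    | cons d u =>
      have hlen' : t.length = u.length := by simpa using hlen
      rw [Hc_cons, Hc_cons, hlen'] at h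
      have ht1 : 0 ≤ Hc t := Hc_nonneg t
      have ht2 : Hc t < 128 ^ u.length := hlen' ▸ Hc_lt t (fun x hx => h₁ x (List.mem_cons_of_mem _ hx))
      have hu1 : 0 ≤ Hc u := Hc_nonneg u
      have hu2 : Hc u < 128 ^ u.length := Hc_lt u (fun x hx => h₂ x (List.mem_cons_of_mem _ hx))
      have hp : (0:Int) < 128 ^ u.length := by positivity
      have hcd : (c.toNat : Int) = (d.toNat : Int) := by
        by_contra hne
        have h1 : (c.toNat : Int) * 128 ^ u.length - (d.toNat : Int) * 128 ^ u.length = Hc u - Hc t := by linarith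
        rcases lt_or_gt_of_ne hne with hlt | hlt
        · nlinarith
        · nlinarith
      have hc : c = d := by
        have : c.toNat = d.toNat := by exact_mod_cast hcd
        exact Char.ext (UInt32.toNat_inj.mp this)
      subst hc
      have : Hc t = Hc u := by omega
      rw [ih u (fun x hx => h₁ x (List.mem_cons_of_mem _ hx))
        (fun x hx => h₂ x (List.mem_cons_of_mem _ hx)) hlen' this]

lemma Hc_pal_iff (l : List Char) (h : ∀ c ∈ l, c.toNat < 128) :
    (Hc l = Hc l.reverse) ↔ l = l.reverse := by
  constructor
  · intro he
    exact Hc_inj l l.reverse h (fun c hc => h c (List.mem_reverse.mp hc)) (by simp) he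
  · intro he; rw [← he]

-- the four slice expressions A's loop body takes apart, as take/drop of the character list
lemma slice1 (w : String) (k : Nat) :
    PySem.Str.slice w (some (k : Int)) none = String.ofList (w.toList.drop k) := by
  rw [← String.toList_inj, PySem.Str.toList_slice, PySem.Chars.slice_eq_listSlice,
    PySem.List.slice_from_natCast, String.toList_ofList]

lemma slice2 (w : String) (k : Nat) :
    PySem.Str.slice w none (some (k : Int)) = String.ofList (w.toList.take k) := by
  rw [← String.toList_inj, PySem.Str.toList_slice, PySem.Chars.slice_eq_listSlice,
    PySem.List.slice_to_natCast, String.toList_ofList]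

lemma slice3 (w : String) (k : Nat) (hk : k ≤ w.toList.length) :
    PySem.Str.slice (String.ofList w.toList.reverse) none (some ((w.toList.length : Int) - (k : Int))) =
      String.ofList (w.toList.drop k).reverse := by
  rw [← String.toList_inj, PySem.Str.toList_slice, PySem.Chars.slice_eq_listSlice,
    String.toList_ofList, String.toList_ofList,
    PySem.List.slice_to w.toList.reverse (b := (w.toList.length : Int) - (k : Int)) (by omega),
    List.reverse_drop]
  congr 1
  omega

lemma slice4 (w : String) (k : Nat) (hk : k ≤ w.toList.length) :
    PySem.Str.slice (String.ofList w.toList.reverse) (some ((w.toList.length : Int) - (k : Int))) none =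
      String.ofList (w.toList.take k).reverse := by
  rw [← String.toList_inj, PySem.Str.toList_slice, PySem.Chars.slice_eq_listSlice,
    String.toList_ofList, String.toList_ofList,
    PySem.List.slice_from w.toList.reverse (a := (w.toList.length : Int) - (k : Int)) (by omega),
    List.reverse_take]
  congr 1
  omega

-- the inner-loop invariant: B's rolling state at split i carries the hashes of w[:i], w[i:]
-- and reversed w[i:]; with it, B's fold produces exactly A's fold result
lemma inner_eq (words : List String) (w : String)
    (hd : ∀ c ∈ w.toList, c.toNat < 128) :
    ∀ (k i : Nat) (acc : List (String × String)) (pd : Int),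
      i + k = w.toList.length →
      (i < w.toList.length → pd = 128 ^ (w.toList.length - 1 - i)) →
      ((PySem.List.pyRange (i : Int) (w.toList.length : Int) 1).foldl
          (stepB words w (Hc w.toList.reverse))
          (acc, Hc (w.toList.take i), Hc (w.toList.drop i), Hc ((w.toList.drop i).reverse), pd, 128 ^ i)).1
        = (PySem.List.pyRange (i : Int) (w.toList.length : Int) 1).foldl (fun acc i =>
            let acc :=
              if (PySem.Str.slice w (some i) none ==
                    PySem.Str.slice (String.ofList w.toList.reverse) none (some ((w.toList.length : Int) - i)))
                  && words.contains (PySem.Str.slice (String.ofList w.toList.reverse) (some ((w.toList.length : Int) - i)) none) then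
                acc ++ [(w, PySem.Str.slice (String.ofList w.toList.reverse) (some ((w.toList.length : Int) - i)) none)]
              else acc
            if (PySem.Str.slice w none (some i) ==
                  PySem.Str.slice (String.ofList w.toList.reverse) (some ((w.toList.length : Int) - i)) none)
                && words.contains (PySem.Str.slice (String.ofList w.toList.reverse) none (some ((w.toList.length : Int) - i))) then
              acc ++ [(PySem.Str.slice (String.ofList w.toList.reverse) none (some ((w.toList.length : Int) - i)), w)]
            else acc) acc := by
  intro k
  induction k with
  | zero =>
    intro i acc pd hik hpd
    have hi : i = w.toList.length := by omega
    subst hi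
    rw [PySem.List.pyRange_one_eq_nil (le_refl _)]
    rfl
  | succ k ih =>
    intro i acc pd hik hpd
    have hin : i < w.toList.length := by omega
    have hcast : ((i : Int) < (w.toList.length : Int)) := by exact_mod_cast hin
    rw [PySem.List.pyRange_one_cons hcast]
    simp only [List.foldl_cons]
    have hd_drop : ∀ c ∈ w.toList.drop i, c.toNat < 128 :=
      fun c hc => hd c (List.mem_of_mem_drop hc)
    have hd_take : ∀ c ∈ w.toList.take i, c.toNat < 128 :=
      fun c hc => hd c (List.mem_of_mem_take hc)
    -- the character read at split i
    have hgetc : (PySem.Str.pyGet? w (i : Int)).getD ' ' = w.toList[i] := by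
      simp [List.getElem?_eq_getElem hin]
    -- rolling-state advance
    have htake : Hc (w.toList.take i) * 128 + ((w.toList[i].toNat : Int)) = Hc (w.toList.take (i + 1)) := by
      have ht : w.toList.take (i + 1) = w.toList.take i ++ [w.toList[i]] := by
        rw [List.take_add_one, List.getElem?_eq_getElem hin]
        rfl
      rw [ht, Hc_append]
      simp [Hc]
    have hdropcons : w.toList.drop i = w.toList[i] :: w.toList.drop (i + 1) :=
      List.drop_eq_getElem_cons hin
    have hlendrop : (w.toList.drop (i + 1)).length = w.toList.length - 1 - i := by
      simp [List.length_drop]; omega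
    have hdrop : Hc (w.toList.drop i) - (w.toList[i].toNat : Int) * pd = Hc (w.toList.drop (i + 1)) := by
      rw [hdropcons, Hc_cons, hlendrop, hpd hin]; ring
    have hrevsplit : (w.toList.drop i).reverse = (w.toList.drop (i + 1)).reverse ++ [w.toList[i]] := by
      rw [hdropcons]; simp
    have hHrev : Hc ((w.toList.drop i).reverse)
        = Hc ((w.toList.drop (i + 1)).reverse) * 128 + (w.toList[i].toNat : Int) := by
      rw [hrevsplit, Hc_append]
      simp [Hc]
    have hrk : PySem.Int.floordiv (Hc ((w.toList.drop i).reverse) - (w.toList[i].toNat : Int)) 128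
        = Hc ((w.toList.drop (i + 1)).reverse) := by
      rw [hHrev, PySem.Int.floordiv_eq_ediv_of_pos (by norm_num)]
      have : Hc ((w.toList.drop (i + 1)).reverse) * 128 + (w.toList[i].toNat : Int) - (w.toList[i].toNat : Int)
          = Hc ((w.toList.drop (i + 1)).reverse) * 128 := by ring
      rw [this, Int.mul_ediv_cancel _ (by norm_num)]
    have hpd' : (i + 1 < w.toList.length →
        PySem.Int.floordiv pd 128 = 128 ^ (w.toList.length - 1 - (i + 1))) := by
      intro hi1
      rw [hpd hin, PySem.Int.floordiv_eq_ediv_of_pos (by norm_num)]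
      have : w.toList.length - 1 - i = (w.toList.length - 1 - (i + 1)) + 1 := by omega
      rw [this, pow_succ, Int.mul_ediv_cancel _ (by norm_num)]
    have hq : (128 : Int) ^ i * 128 = 128 ^ (i + 1) := by rw [pow_succ]
    -- condition 1: "w[i:] is a palindrome", both as Bools
    have e1 : (Hc (w.toList.drop i) == Hc ((w.toList.drop i).reverse))
        = (String.ofList (w.toList.drop i) == String.ofList ((w.toList.drop i).reverse)) := by
      simp only [Bool.beq_eq_decide_eq, String.ofList_inj]
      exact decide_eq_decide.mpr (Hc_pal_iff _ hd_drop)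
    -- condition 2: "w[:i] is a palindrome", both as Bools
    have e2 : Hc w.toList.reverse - Hc ((w.toList.drop i).reverse) * 128 ^ i
        = Hc ((w.toList.take i).reverse) := by
      have hsplit : w.toList.reverse = (w.toList.drop i).reverse ++ (w.toList.take i).reverse := by
        conv_lhs => rw [← List.take_append_drop i w.toList]
        rw [List.reverse_append]
      rw [hsplit, Hc_append]
      have : ((w.toList.take i).reverse).length = i := by
        rw [List.length_reverse, List.length_take]
        omega
      rw [this]; ring
    have e2' : (Hc (w.toList.take i) == Hc w.toList.reverse - Hc ((w.toList.drop i).reverse) * 128 ^ i)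
        = (String.ofList (w.toList.take i) == String.ofList ((w.toList.take i).reverse)) := by
      rw [e2]
      simp only [Bool.beq_eq_decide_eq, String.ofList_inj]
      exact decide_eq_decide.mpr (Hc_pal_iff _ hd_take)
    -- rewrite A's slices into take/drop form
    rw [slice1 w i, slice2 w i, slice3 w i hin.le, slice4 w i hin.le]
    -- compute B's step
    simp only [stepB, hgetc]
    rw [slice1 w i, slice2 w i]
    simp only [String.toList_ofList]
    rw [e1, e2', htake, hdrop, hrk, hq]
    simp only [if_and_append]
    have hcastsucc : ((i : Int) + 1) = ((i + 1 : Nat) : Int) := by push_cast; ring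
    rw [hcastsucc]
    exact ih (i + 1) _ _ (by omega) hpd'

theorem find_multi_word_palindromes_eq (words : List String)
    (hdom : Dom_find_multi_word_palindromes words) :
    find_multi_word_palindromes words = find_multi_word_palindromes_alt words := by
  unfold find_multi_word_palindromes find_multi_word_palindromes_alt
  refine PySem.List.foldl_congr_mem _ _ _ _ ?_
  intro acc w hw
  dsimp only
  have hd : ∀ c ∈ w.toList, c.toNat < 128 := by
    have hws : pvDomStr w = true := by
      simpa using (List.all_eq_true.mp hdom) w hw
    intro c hc
    have hcc := (List.all_eq_true.mp hws) c hc
    simp only [pvDomChar, Bool.or_eq_true, Bool.and_eq_true, decide_eq_true_eq, beq_iff_eq] at hcc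
    omega
  simp only [PySem.Str.len_eq]
  by_cases hn : (1 : Int) < (w.toList.length : Int)
  · rw [if_pos hn, if_pos hn]
    have hpd : (0 < w.toList.length →
        (128 : Int) ^ (((w.toList.length : Int)) - 1).toNat = 128 ^ (w.toList.length - 1 - 0)) := by
      intro _
      have h1 : (((w.toList.length : Int)) - 1).toNat = w.toList.length - 1 - 0 := by omega
      rw [h1]
    exact (inner_eq words w hd w.toList.length 0 acc
      ((128 : Int) ^ (((w.toList.length : Int)) - 1).toNat) (by omega) hpd).symm
  · rw [if_neg hn, if_neg hn]

-- ===== VERDICT (by name: the statement is the Claim_ definition above) =====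
theorem find_multi_word_palindromes_spec : Claim_equal_find_multi_word_palindromes := by
  intro words hdom
  unfold Spec_find_multi_word_palindromes
  exact find_multi_word_palindromes_eq words hdom
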